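-- pv_equiv track=rewrite | github.com/SyngyeonTak/SBRs | experiments/noise_aware/get_statistics.py | count_high_nodes_in_sessions
-- ===== SOURCE A (Python) =====
-- def count_high_nodes_in_sessions(data, high_degree_nodes, high_coreness_nodes):
--     session_high_degree_counts = []
--     session_high_coreness_counts = []
--
--     for session in data:
--         high_degree_count = len([node for node in session if node in high_degree_nodes])
--         high_coreness_count = len([node for node in session if node in high_coreness_nodes])
--
--         session_high_degree_counts.append(high_degree_count)
--         session_high_coreness_counts.append(high_coreness_count)
--
--     return session_high_degree_counts, session_high_coreness_counts
-- ===== SOURCE B (Python) =====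
-- def count_high_nodes_in_sessions(data, high_degree_nodes, high_coreness_nodes):
--     degree_set = set(high_degree_nodes)
--     coreness_set = set(high_coreness_nodes)
--     session_high_degree_counts = []
--     session_high_coreness_counts = []
--     for session in data:
--         multiplicity = {}
--         for node in session:
--             multiplicity[node] = multiplicity.get(node, 0) + 1
--         session_high_degree_counts.append(
--             sum(m for node, m in multiplicity.items() if node in degree_set))
--         session_high_coreness_counts.append(
--             sum(m for node, m in multiplicity.items() if node in coreness_set))
--     return session_high_degree_counts, session_high_coreness_counts
-- ===== Notes on version B (the rewrite author's own statement) =====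
-- stated objective: alternative
-- what changed: B builds a per-session multiplicity dictionary (a counter) in one pass and then sums multiplicities over the counter's distinct items filtered by precomputed hash sets of the query lists, replacing A's two per-session comprehensions that test every node against the raw query lists.
import Mathlib
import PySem

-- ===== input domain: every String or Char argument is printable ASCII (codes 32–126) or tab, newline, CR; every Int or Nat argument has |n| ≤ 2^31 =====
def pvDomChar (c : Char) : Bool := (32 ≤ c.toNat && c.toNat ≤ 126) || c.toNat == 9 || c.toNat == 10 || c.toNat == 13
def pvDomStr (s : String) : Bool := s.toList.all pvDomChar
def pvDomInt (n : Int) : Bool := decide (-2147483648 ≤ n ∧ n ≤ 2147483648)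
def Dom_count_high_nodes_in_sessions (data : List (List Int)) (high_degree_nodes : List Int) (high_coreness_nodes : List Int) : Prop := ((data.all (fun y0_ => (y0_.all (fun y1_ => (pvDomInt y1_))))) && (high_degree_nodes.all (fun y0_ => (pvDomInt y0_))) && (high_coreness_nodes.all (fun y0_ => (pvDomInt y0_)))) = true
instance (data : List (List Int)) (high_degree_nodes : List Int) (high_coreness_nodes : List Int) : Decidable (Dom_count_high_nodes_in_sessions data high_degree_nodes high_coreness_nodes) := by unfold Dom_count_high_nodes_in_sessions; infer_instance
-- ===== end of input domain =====

-- B replaces the two per-session membership scans by a per-session multiplicity dict summed over the deduplicated query sets (objective: alternative; return value only).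
-- ===== PORT A =====
def count_high_nodes_in_sessions (data : List (List Int)) (high_degree_nodes : List Int) (high_coreness_nodes : List Int) : List Int × List Int :=
  let r := data.foldl (fun acc session =>
    let high_degree_count : Int := ((session.filter (fun node => high_degree_nodes.contains node)).length : Int)
    let high_coreness_count : Int := ((session.filter (fun node => high_coreness_nodes.contains node)).length : Int)
    (acc.1 ++ [high_degree_count], acc.2 ++ [high_coreness_count])) (([] : List Int), ([] : List Int))
  r

-- ===== PORT B =====
def count_high_nodes_in_sessions_alt (data : List (List Int)) (high_degree_nodes : List Int) (high_coreness_nodes : List Int) : List Int × List Int :=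
  let degree_set : PySem.Set Int := PySem.Set.ofList high_degree_nodes
  let coreness_set : PySem.Set Int := PySem.Set.ofList high_coreness_nodes
  data.foldl (fun acc session =>
    let multiplicity : PySem.Dict Int Int :=
      session.foldl (fun d node => d.insert node (d.getD node 0 + 1)) PySem.Dict.empty
    (acc.1 ++ [multiplicity.items.foldl (fun s p => if degree_set.contains p.1 then s + p.2 else s) 0],
     acc.2 ++ [multiplicity.items.foldl (fun s p => if coreness_set.contains p.1 then s + p.2 else s) 0])) (([] : List Int), ([] : List Int))

-- ===== PRECONDITION & SPEC =====
def Spec_count_high_nodes_in_sessions (data : List (List Int)) (high_degree_nodes : List Int) (high_coreness_nodes : List Int) (out : List Int × List Int) : Prop := out = count_high_nodes_in_sessions_alt data high_degree_nodes high_coreness_nodes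
instance (data : List (List Int)) (high_degree_nodes : List Int) (high_coreness_nodes : List Int) (out : List Int × List Int) : Decidable (Spec_count_high_nodes_in_sessions data high_degree_nodes high_coreness_nodes out) := by unfold Spec_count_high_nodes_in_sessions; infer_instance

-- ===== CLAIM (what is proved, stated in full; the proofs are below) =====
def Claim_equal_count_high_nodes_in_sessions : Prop := ∀ (data : List (List Int)) (high_degree_nodes : List Int) (high_coreness_nodes : List Int), Dom_count_high_nodes_in_sessions data high_degree_nodes high_coreness_nodes → Spec_count_high_nodes_in_sessions data high_degree_nodes high_coreness_nodes (count_high_nodes_in_sessions data high_degree_nodes high_coreness_nodes)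

-- ===== LEMMAS AND PROOFS =====


-- indicator sum over a Nodup list is a membership test
theorem pv_ind (x : Int) (s : List Int) (hnd : s.Nodup) :
    (s.map (fun h => if x = h then (1:Int) else 0)).sum = if x ∈ s then 1 else 0 := by
  induction s with
  | nil => simp
  | cons a t ih =>
    have ha : a ∉ t := (List.nodup_cons.mp hnd).1
    by_cases hxa : x = a
    · subst hxa
      simp only [List.map_cons, List.sum_cons, List.mem_cons, true_or, if_pos]
      have : (t.map (fun h => if x = h then (1:Int) else 0)).sum = 0 := by
        apply List.sum_eq_zero
        intro y hy
        obtain ⟨h, hh, rfl⟩ := List.mem_map.mp hy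
        have : x ≠ h := fun e => ha (e ▸ hh)
        simp [this]
      omega
    · have := ih hnd.of_cons
      simp [hxa, this]

-- over a Nodup list, summing count of each element equals countP of membership
theorem pv_sum_count (s : List Int) (hnd : s.Nodup) (session : List Int) :
    (s.map (fun h => ((session.count h : Nat) : Int))).sum
      = ((session.countP (fun n => decide (n ∈ s)) : Nat) : Int) := by
  induction session with
  | nil => simp
  | cons x xs ih =>
    calc (s.map (fun h => (((x :: xs).count h : Nat) : Int))).sum
        = (s.map (fun h => ((xs.count h : Nat) : Int) + (if x = h then (1:Int) else 0))).sum := by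
          apply congrArg List.sum
          apply List.map_congr_left
          intro h _
          rw [List.count_cons]
          by_cases hhx : h = x
          · simp [hhx]
          · simp [Ne.symm hhx]
      _ = (s.map (fun h => ((xs.count h : Nat) : Int))).sum
            + (s.map (fun h => if x = h then (1:Int) else 0)).sum := by
          rw [← List.sum_map_add]
      _ = ((xs.countP (fun n => decide (n ∈ s)) : Nat) : Int) + (if x ∈ s then (1:Int) else 0) := by
          rw [ih, pv_ind x s hnd]
      _ = (((x :: xs).countP (fun n => decide (n ∈ s)) : Nat) : Int) := by
          by_cases hxs : x ∈ s <;> simp [hxs]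

-- B's per-session filtered sum over the counter's items equals A's filter length
theorem pv_session (hd session : List Int) :
    (session.foldl (fun d node => d.insert node (d.getD node 0 + 1)) PySem.Dict.empty).items.foldl
      (fun s p => if (PySem.Set.ofList hd).contains p.1 then s + p.2 else s) 0
      = ((session.filter (fun node => hd.contains node)).length : Int) := by
  rw [PySem.Dict.foldl_insert_getD_add_one_eq_counter, PySem.Dict.items_counter, List.foldl_map]
  rw [PySem.List.foldl_if_eq_foldl_filter, PySem.List.foldl_add, zero_add]
  have hnd : ((PySem.Set.ofList session).filter
      (fun k => (PySem.Set.ofList hd).contains k)).Nodup :=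
    (PySem.Set.nodup_ofList session).filter _
  rw [pv_sum_count _ hnd session]
  have hp : ∀ n ∈ session,
      (decide (n ∈ (PySem.Set.ofList session).filter (fun k => (PySem.Set.ofList hd).contains k)))
        = true ↔ hd.contains n = true := by
    intro n hn
    simp [List.mem_filter, PySem.Set.mem_ofList, hn]
  rw [List.countP_congr hp, List.countP_eq_length_filter]

-- ===== VERDICT (by name: the statement is the Claim_ definition above) =====
theorem count_high_nodes_in_sessions_spec : Claim_equal_count_high_nodes_in_sessions := by
  intro data hd hc _
  unfold Spec_count_high_nodes_in_sessions count_high_nodes_in_sessions count_high_nodes_in_sessions_alt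
  apply PySem.List.foldl_congr_mem
  intro acc session _
  simp only [pv_session hd session, pv_session hc session]
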